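-- pv_equiv track=rewrite | github.com/tolldog/khonliang-bus | bus/db.py | _glob_escape
-- ===== SOURCE A (Python) =====
-- def _glob_escape(value: str) -> str:
--     """Escape SQLite ``GLOB`` metacharacters in a literal-match
--     prefix. ``GLOB`` treats ``*``, ``?``, and ``[`` specially;
--     bracket-escape each so the prefix matches verbatim. ``[`` is
--     bracket-quoted as ``[[]`` so it doesn't open a character
--     class. ``GLOB`` has no ``ESCAPE`` clause (unlike ``LIKE``),
--     so this is the standard escape strategy."""
--     out = []
--     for c in value:
--         if c in "*?[":
--             out.append(f"[{c}]")
--         else: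
--             out.append(c)
--     return "".join(out)
-- ===== SOURCE B (Python) =====
-- def _glob_escape(value: str) -> str:
--     # Three whole-string replace passes; '[' first so the brackets
--     # inserted by the '*' and '?' passes are never re-escaped.
--     return value.replace("[", "[[]").replace("*", "[*]").replace("?", "[?]")
-- ===== Notes on version B (the rewrite author's own statement) =====
-- stated objective: faster
-- what changed: Replaced the per-character loop with appends and a join by three whole-string str.replace passes ('[' first so later passes never re-escape inserted brackets); the scanning moves into C-level str.replace.
import Mathlib
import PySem

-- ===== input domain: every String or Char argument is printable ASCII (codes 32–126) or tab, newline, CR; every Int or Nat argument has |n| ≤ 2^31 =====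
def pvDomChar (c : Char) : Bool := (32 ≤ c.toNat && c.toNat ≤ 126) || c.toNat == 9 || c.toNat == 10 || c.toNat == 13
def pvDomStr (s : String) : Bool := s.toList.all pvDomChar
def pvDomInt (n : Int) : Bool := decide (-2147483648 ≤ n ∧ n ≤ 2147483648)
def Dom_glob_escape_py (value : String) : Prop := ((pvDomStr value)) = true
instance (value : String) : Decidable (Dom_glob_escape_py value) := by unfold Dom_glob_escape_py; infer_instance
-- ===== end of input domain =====

-- B replaces A's per-character loop by three whole-string replace passes ('[' first); faster by a constant factor (C-level str.replace), measured.

-- ===== PORT A =====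
-- per-character loop: append "[c]" for a metacharacter, c otherwise, then join.
-- `c in "*?["` (single char in a literal) is ported by hand as list membership, which is exact for one-character `c`.
def glob_escape_py (value : String) : String :=
  let out : List String := value.toList.foldl
    (fun (out : List String) c =>
      if ("*?[".toList.contains c) then out ++ [String.ofList ['[', c, ']']]
      else out ++ [String.ofList [c]]) []
  PySem.Str.join "" out

-- ===== PORT B =====
-- three whole-string replace passes, '[' first
def glob_escape_py_alt (value : String) : String :=
  PySem.Str.replace (PySem.Str.replace (PySem.Str.replace value "[" "[[]") "*" "[*]") "?" "[?]"

-- ===== PRECONDITION & SPEC =====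
def Spec_glob_escape_py (value : String) (out : String) : Prop := out = glob_escape_py_alt value
instance (value : String) (out : String) : Decidable (Spec_glob_escape_py value out) := by unfold Spec_glob_escape_py; infer_instance

-- ===== CLAIM (what is proved, stated in full; the proofs are below) =====
def Claim_equal_glob_escape_py : Prop := ∀ (value : String), Dom_glob_escape_py value → Spec_glob_escape_py value (glob_escape_py value)

-- ===== LEMMAS AND PROOFS =====

theorem intercalate_nil_eq_flatten (l : List (List Char)) : [].intercalate l = l.flatten := by
  induction l with
  | nil => simp [List.intercalate]
  | cons a t ih => cases t <;> simp_all [List.intercalate]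

-- single-character replace is a flatMap over the characters
theorem go_single (x : Char) (new : List Char) :
    ∀ (l : List Char) (fuel : Nat) (acc : List Char), l.length ≤ fuel →
      PySem.Chars.replace.go [x] new fuel l acc
        = acc.reverse ++ l.flatMap (fun c => if c = x then new else [c]) := by
  intro l
  induction l with
  | nil =>
    intro fuel acc _
    cases fuel <;> simp [PySem.Chars.replace.go]
  | cons c t ih =>
    intro fuel acc hfuel
    cases fuel with
    | zero => simp at hfuel
    | succ n =>
      have hn : t.length ≤ n := by simp at hfuel; omega
      simp only [PySem.Chars.replace.go]
      by_cases hc : c = x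
      · subst hc
        have hpre : List.isPrefixOf [c] (c :: t) = true := by
          simp [List.isPrefixOf]
        rw [hpre]
        rw [show List.drop [c].length (c :: t) = t from rfl]
        rw [ih n (new.reverse ++ acc) hn]
        simp
      · have hpre : List.isPrefixOf [x] (c :: t) = false := by
          simp [List.isPrefixOf]
          exact fun h => hc h.symm
        rw [hpre]
        simp only [Bool.false_eq_true, if_false]
        rw [ih n (c :: acc) hn]
        simp [hc]

theorem replace_single (s : List Char) (x : Char) (new : List Char) :
    PySem.Chars.replace s [x] new = s.flatMap (fun c => if c = x then new else [c]) := by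
  unfold PySem.Chars.replace
  simp [go_single x new s s.length [] (le_refl _)]

-- the composition of the three per-character substitutions equals A's per-character escape
theorem pointwise (c : Char) :
    ((if c = '[' then ['[', '[', ']'] else [c]).flatMap
        (fun x => (if x = '*' then ['[', '*', ']'] else [x]).flatMap
          (fun d => if d = '?' then ['[', '?', ']'] else [d])))
      = (if (['*', '?', '['].contains c) then ['[', c, ']'] else [c]) := by
  by_cases h1 : c = '[' ; · subst h1; decide
  by_cases h2 : c = '*' ; · subst h2; decide
  by_cases h3 : c = '?' ; · subst h3; decide
  simp [h1, h2, h3]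

-- ===== VERDICT (by name: the statement is the Claim_ definition above) =====
theorem glob_escape_py_spec : Claim_equal_glob_escape_py := by
  intro value _
  unfold Spec_glob_escape_py glob_escape_py glob_escape_py_alt
  -- reduce both sides to String.ofList of a flatMap over value.toList
  have hA : (value.toList.foldl
      (fun (out : List String) c =>
        if ("*?[".toList.contains c) then out ++ [String.ofList ['[', c, ']']]
        else out ++ [String.ofList [c]]) [])
      = value.toList.map (fun c =>
          if ("*?[".toList.contains c) then String.ofList ['[', c, ']'] else String.ofList [c]) := by
    have : ∀ (l : List Char) (acc : List String),
        l.foldl (fun (out : List String) c =>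
          if ("*?[".toList.contains c) then out ++ [String.ofList ['[', c, ']']]
          else out ++ [String.ofList [c]]) acc
        = acc ++ l.map (fun c =>
            if ("*?[".toList.contains c) then String.ofList ['[', c, ']'] else String.ofList [c]) := by
      intro l
      induction l with
      | nil => simp
      | cons c t ih =>
        intro acc
        simp only [List.foldl_cons, List.map_cons]
        by_cases h : ("*?[".toList.contains c)
        · rw [if_pos h, ih, if_pos h]; simp
        · rw [if_neg h, ih, if_neg h]; simp
    simpa using this value.toList []
  rw [hA]
  unfold PySem.Str.join PySem.Str.replace
  refine congrArg String.ofList ?_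
  simp only [String.toList_ofList, replace_single, String.reduceToList, List.map_map,
    PySem.Chars.join, intercalate_nil_eq_flatten, List.flatMap_assoc]
  generalize value.toList = l
  induction l with
  | nil => simp
  | cons c t ih =>
    simp only [List.map_cons, List.flatten_cons, List.flatMap_cons, ih]
    congr 1
    rw [pointwise c]
    by_cases h1 : c = '*' ; · subst h1; decide
    by_cases h2 : c = '?' ; · subst h2; decide
    by_cases h3 : c = '[' ; · subst h3; decide
    simp [h1, h2, h3]
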